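-- pv_equiv track=rewrite | github.com/ChahraouiYasmin/SRIRecipe | FrontEnd/src/filter.py | filter_recipes
-- ===== SOURCE A (Python) =====
-- def filter_recipes(recipes, country=None, difficulty=None, meal_type=None):
--     filtered = []
--     for r in recipes:
--         if country and r.get("country").lower() != country.lower():
--             continue
--         if difficulty and r.get("difficulty").lower() != difficulty.lower():
--             continue
--         if meal_type and r.get("meal_type").lower() != meal_type.lower():
--             continue
--         filtered.append(r)
--     return filtered
-- ===== SOURCE B (Python) =====
-- def filter_recipes(recipes, country=None, difficulty=None, meal_type=None):
--     # Successive filtering passes: one pass over the list per active filter,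
--     # with the wanted value lowered once per pass.
--     result = list(recipes)
--     for key, want in (("country", country), ("difficulty", difficulty), ("meal_type", meal_type)):
--         if want:
--             want = want.lower()
--             result = [r for r in result if r.get(key).lower() == want]
--     return result
-- ===== Notes on version B (the rewrite author's own statement) =====
-- stated objective: idiomatic
-- what changed: Replaces the single loop with three fixed if/continue branches per recipe by a maintained (key, wanted) filter table driving successive filtering passes, one pass per active filter, lowering the wanted value once per pass instead of once per recipe.
import Mathlib
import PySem

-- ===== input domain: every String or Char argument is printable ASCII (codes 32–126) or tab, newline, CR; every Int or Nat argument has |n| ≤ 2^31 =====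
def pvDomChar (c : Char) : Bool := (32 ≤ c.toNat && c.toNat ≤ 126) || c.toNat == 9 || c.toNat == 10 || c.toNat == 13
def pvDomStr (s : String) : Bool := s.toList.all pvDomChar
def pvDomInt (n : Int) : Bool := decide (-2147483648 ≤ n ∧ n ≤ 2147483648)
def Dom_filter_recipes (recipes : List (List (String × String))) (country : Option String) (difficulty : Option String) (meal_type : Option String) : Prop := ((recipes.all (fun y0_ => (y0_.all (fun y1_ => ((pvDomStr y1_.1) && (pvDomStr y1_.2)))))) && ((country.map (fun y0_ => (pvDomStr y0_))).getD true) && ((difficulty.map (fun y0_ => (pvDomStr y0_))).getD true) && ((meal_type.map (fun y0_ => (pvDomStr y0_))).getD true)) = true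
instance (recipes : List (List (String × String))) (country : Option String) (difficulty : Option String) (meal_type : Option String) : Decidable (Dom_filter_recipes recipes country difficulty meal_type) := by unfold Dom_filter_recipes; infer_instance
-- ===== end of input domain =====

-- ===== PORT A =====
-- B differs from A by decomposition: a (key, wanted) filter table driving successive filtering
-- passes, instead of one loop with three fixed if/continue branches (same cost; not faster).
-- A-side helpers: truthiness of an optional string, and r.get(k).lower() / v.lower().
def pvTruthyA (o : Option String) : Bool :=
  match o with
  | none => false
  | some s => !(s == "")

-- exact under Pre_: A only calls .lower() on r.get(k) when the key is present (else Python raises)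
def pvLowGetA (r : List (String × String)) (k : String) : String :=
  PySem.Str.lower ((r.lookup k).getD "")

def pvLowArgA (o : Option String) : String :=
  PySem.Str.lower (o.getD "")

def filter_recipes (recipes : List (List (String × String))) (country : Option String) (difficulty : Option String) (meal_type : Option String) : List (List (String × String)) :=
  recipes.foldl (fun filtered r =>
    if pvTruthyA country && !(pvLowGetA r "country" == pvLowArgA country) then filtered
    else if pvTruthyA difficulty && !(pvLowGetA r "difficulty" == pvLowArgA difficulty) then filtered
    else if pvTruthyA meal_type && !(pvLowGetA r "meal_type" == pvLowArgA meal_type) then filtered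
    else filtered ++ [r]) []

-- ===== PORT B =====
-- one filtering pass for one active (key, want) table entry; want lowered once per pass
def pvPassB (result : List (List (String × String))) (kv : String × Option String) : List (List (String × String)) :=
  match kv.2 with
  | none => result
  | some w =>
    if w == "" then result
    else
      let want := PySem.Str.lower w
      result.filter (fun r => PySem.Str.lower ((r.lookup kv.1).getD "") == want)

def filter_recipes_alt (recipes : List (List (String × String))) (country : Option String) (difficulty : Option String) (meal_type : Option String) : List (List (String × String)) :=
  [("country", country), ("difficulty", difficulty), ("meal_type", meal_type)].foldl pvPassB recipes

-- ===== PRECONDITION & SPEC =====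
-- Pre_ excludes exactly the inputs on which Python A raises AttributeError (.lower() on the
-- None returned by r.get(k) for a missing key, in the order country, difficulty, meal_type,
-- later checks reached only when the earlier active checks match); B raises the same way there.
def pvHasKey (r : List (String × String)) (k : String) : Bool := (r.lookup k).isSome

-- "this active filter does not reject r" (vacuously true when the filter is inactive)
def pvPasses (r : List (String × String)) (k : String) (o : Option String) : Bool :=
  !(pvTruthyA o && !(pvLowGetA r k == pvLowArgA o))

def Pre_filter_recipes (recipes : List (List (String × String))) (country : Option String) (difficulty : Option String) (meal_type : Option String) : Prop :=
  ∀ r ∈ recipes,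
    (pvTruthyA country = true → pvHasKey r "country" = true) ∧
    (pvPasses r "country" country = true → pvTruthyA difficulty = true → pvHasKey r "difficulty" = true) ∧
    (pvPasses r "country" country = true → pvPasses r "difficulty" difficulty = true →
      pvTruthyA meal_type = true → pvHasKey r "meal_type" = true)

instance (recipes : List (List (String × String))) (country : Option String) (difficulty : Option String) (meal_type : Option String) : Decidable (Pre_filter_recipes recipes country difficulty meal_type) := by unfold Pre_filter_recipes; infer_instance

def pvWitness_filter_recipes : (List (List (String × String))) × Option String × Option String × Option String :=
  ([[("country", "FR"), ("difficulty", "Easy"), ("meal_type", "dinner")],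
    [("country", "it"), ("meal_type", "lunch")]],
   some "fr", none, some "Dinner")

def Spec_filter_recipes (recipes : List (List (String × String))) (country : Option String) (difficulty : Option String) (meal_type : Option String) (out : List (List (String × String))) : Prop := out = filter_recipes_alt recipes country difficulty meal_type
instance (recipes : List (List (String × String))) (country : Option String) (difficulty : Option String) (meal_type : Option String) (out : List (List (String × String))) : Decidable (Spec_filter_recipes recipes country difficulty meal_type out) := by unfold Spec_filter_recipes; infer_instance

-- ===== CLAIM (what is proved, stated in full; the proofs are below) =====
def Claim_equal_filter_recipes : Prop := ∀ (recipes : List (List (String × String))) (country : Option String) (difficulty : Option String) (meal_type : Option String), Dom_filter_recipes recipes country difficulty meal_type → Pre_filter_recipes recipes country difficulty meal_type → Spec_filter_recipes recipes country difficulty meal_type (filter_recipes recipes country difficulty meal_type)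

-- ===== LEMMAS AND PROOFS =====
-- A's loop is a filter by the conjunction of the three per-key pass tests.
theorem filterA_eq_filter (recipes : List (List (String × String))) (country difficulty meal_type : Option String) :
    filter_recipes recipes country difficulty meal_type =
      recipes.filter (fun r => pvPasses r "country" country && pvPasses r "difficulty" difficulty
        && pvPasses r "meal_type" meal_type) := by
  unfold filter_recipes
  have hf : (fun (filtered : List (List (String × String))) (r : List (String × String)) =>
      if pvTruthyA country && !(pvLowGetA r "country" == pvLowArgA country) then filtered
      else if pvTruthyA difficulty && !(pvLowGetA r "difficulty" == pvLowArgA difficulty) then filtered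
      else if pvTruthyA meal_type && !(pvLowGetA r "meal_type" == pvLowArgA meal_type) then filtered
      else filtered ++ [r])
    = (fun filtered r =>
      if pvPasses r "country" country && pvPasses r "difficulty" difficulty
          && pvPasses r "meal_type" meal_type then filtered ++ [r] else filtered) := by
    funext acc r
    simp only [pvPasses]
    rcases Bool.eq_false_or_eq_true (pvTruthyA country && !(pvLowGetA r "country" == pvLowArgA country)) with h1 | h1 <;>
      rcases Bool.eq_false_or_eq_true (pvTruthyA difficulty && !(pvLowGetA r "difficulty" == pvLowArgA difficulty)) with h2 | h2 <;>
        rcases Bool.eq_false_or_eq_true (pvTruthyA meal_type && !(pvLowGetA r "meal_type" == pvLowArgA meal_type)) with h3 | h3 <;>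
          simp [h1, h2, h3]
  rw [hf, PySem.List.foldl_append_if_eq_filter]
  simp

-- One B pass is a filter by that key's pass test.
theorem passB_eq_filter (l : List (List (String × String))) (k : String) (o : Option String) :
    pvPassB l (k, o) = l.filter (fun r => pvPasses r k o) := by
  unfold pvPassB pvPasses pvTruthyA pvLowGetA pvLowArgA
  match o with
  | none => simp
  | some w =>
    by_cases hw : (w == "") = true <;> simp [hw]

theorem filter_recipes_spec : Claim_equal_filter_recipes := by
  intro recipes country difficulty meal_type _ _
  unfold Spec_filter_recipes filter_recipes_alt
  simp only [List.foldl_cons, List.foldl_nil, passB_eq_filter, filterA_eq_filter,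
    List.filter_filter]
  apply List.filter_congr
  intro r _
  simp [Bool.and_comm, Bool.and_left_comm]
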